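-- pv_equiv track=rewrite | github.com/HiNala/forge-app | apps/api/app/services/submission_attachments.py | mime_allowed
-- ===== SOURCE A (Python) =====
-- _mime_alias = {
--     "image/jpg": "image/jpeg",
-- }
--
-- def _norm_mime(m: str) -> str:
--     s = m.split(";")[0].strip().lower()
--     return _mime_alias.get(s, s)
--
-- def mime_allowed(declared: str, sniffed: str | None, allowed: frozenset[str]) -> bool:
--     d = _norm_mime(declared)
--     if d in allowed:
--         return True
--     if sniffed and sniffed in allowed:
--         return True
--     for pat in allowed:
--         if pat.endswith("/*"):
--             base = pat[:-2]
--             if d.startswith(base + "/") or (sniffed and sniffed.startswith(base + "/")):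
--                 return True
--     return False
-- ===== SOURCE B (Python) =====
-- _mime_alias = {
--     "image/jpg": "image/jpeg",
-- }
--
-- def _norm_mime(m: str) -> str:
--     s = m.split(";")[0].strip().lower()
--     return _mime_alias.get(s, s)
--
-- def mime_allowed(declared, sniffed, allowed):
--     # Inverted matching: instead of scanning `allowed` for '/*' patterns and
--     # prefix-testing each candidate, derive from the candidate itself every
--     # wildcard pattern that could match it (one per '/' position: m[:i] + "/*")
--     # and test plain set membership; no scan over `allowed` is needed.
--     def ok(m):
--         if m in allowed:
--             return True
--         for i in range(len(m)):
--             if m[i] == "/" and m[:i] + "/*" in allowed: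
--                 return True
--         return False
--     return ok(_norm_mime(declared)) or bool(sniffed and ok(sniffed))
-- ===== Notes on version B (the rewrite author's own statement) =====
-- stated objective: alternative
-- what changed: B inverts the wildcard matching: instead of A's loop over the allowed set prefix-testing each '/*' pattern against both candidates, B derives from each candidate mime the only wildcard patterns that could match it (m[:i] + '/*' for each '/' position i) and tests plain frozenset membership, so the scan over allowed disappears.
import Mathlib
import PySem

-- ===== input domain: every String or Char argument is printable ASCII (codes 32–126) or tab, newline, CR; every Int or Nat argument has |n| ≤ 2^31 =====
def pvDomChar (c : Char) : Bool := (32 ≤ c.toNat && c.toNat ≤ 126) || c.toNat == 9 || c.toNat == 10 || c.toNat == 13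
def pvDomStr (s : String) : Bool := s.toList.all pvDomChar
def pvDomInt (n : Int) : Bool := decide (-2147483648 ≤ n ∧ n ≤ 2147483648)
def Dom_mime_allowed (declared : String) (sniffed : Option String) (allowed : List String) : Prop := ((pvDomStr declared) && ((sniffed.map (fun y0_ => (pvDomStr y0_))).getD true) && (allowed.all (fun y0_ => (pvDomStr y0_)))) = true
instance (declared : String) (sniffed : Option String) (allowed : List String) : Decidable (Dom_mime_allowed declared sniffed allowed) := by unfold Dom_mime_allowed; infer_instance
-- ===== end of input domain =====

-- B inverts the wildcard match: it derives from each candidate the patterns m[:i]+"/*" at its '/' positions and tests membership, instead of A's scan of `allowed` for '/*' patterns with prefix tests; equal return value.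

-- ===== PORT A =====
-- _norm_mime (identical helper in Source A and Source B, ported once): m.split(";")[0].strip().lower(), then the alias dict lookup
def normMime (m : String) : String :=
  let s := PySem.Str.lower (PySem.Str.strip ((((PySem.Str.split? m ";").getD []).headD "")))
  PySem.Dict.getD (PySem.Dict.ofList [("image/jpg", "image/jpeg")]) s s

def mime_allowed (declared : String) (sniffed : Option String) (allowed : List String) : Bool :=
  let d := normMime declared
  if allowed.contains d then true
  else
    -- 'sniffed and …': truthiness of the optional string (not None and not "")
    let t : Bool := match sniffed with | none => false | some s => s ≠ ""
    let sv := sniffed.getD ""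
    if t && allowed.contains sv then true
    else
      -- 'for pat in allowed: if pat.endswith("/*"): … return True / fall through' = List.any
      allowed.any (fun pat =>
        if PySem.Str.endswith pat "/*" then
          let base := PySem.Str.slice pat none (some (-2))
          PySem.Str.startswith d (base ++ "/") || (t && PySem.Str.startswith sv (base ++ "/"))
        else false)

-- ===== PORT B =====
-- Source B's ok(m): exact membership, else for i in range(len(m)): m[i]=='/' and m[:i]+"/*" in allowed
def altOk (allowed : List String) (m : String) : Bool :=
  if allowed.contains m then true
  else
    (PySem.List.pyRange 0 (PySem.Str.len m) 1).any (fun i =>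
      PySem.Str.pyGet? m i == some '/' &&
      allowed.contains (PySem.Str.slice m none (some i) ++ "/*"))

def mime_allowed_alt (declared : String) (sniffed : Option String) (allowed : List String) : Bool :=
  altOk allowed (normMime declared) ||
    (match sniffed with | none => false | some s => s ≠ "" && altOk allowed s)

-- ===== PRECONDITION & SPEC =====
def Spec_mime_allowed (declared : String) (sniffed : Option String) (allowed : List String) (out : Bool) : Prop := out = mime_allowed_alt declared sniffed allowed
instance (declared : String) (sniffed : Option String) (allowed : List String) (out : Bool) : Decidable (Spec_mime_allowed declared sniffed allowed out) := by unfold Spec_mime_allowed; infer_instance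

-- ===== CLAIM (what is proved, stated in full; the proofs are below) =====
def Claim_equal_mime_allowed : Prop := ∀ (declared : String) (sniffed : Option String) (allowed : List String), Dom_mime_allowed declared sniffed allowed → Spec_mime_allowed declared sniffed allowed (mime_allowed declared sniffed allowed)

-- ===== LEMMAS AND PROOFS =====

-- A's wildcard scan over `allowed` for one candidate m equals B's scan over the '/' positions of m.
theorem wild_eq_slash (allowed : List String) (m : String) :
    (allowed.any fun pat =>
        if PySem.Str.endswith pat "/*" then
          PySem.Str.startswith m (PySem.Str.slice pat none (some (-2)) ++ "/")
        else false)
    = (PySem.List.pyRange 0 (PySem.Str.len m) 1).any (fun i =>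
        PySem.Str.pyGet? m i == some '/' &&
        allowed.contains (PySem.Str.slice m none (some i) ++ "/*")) := by
  have tl1 : ("/" : String).toList = ['/'] := rfl
  have tl2 : ("/*" : String).toList = ['/', '*'] := rfl
  rw [Bool.eq_iff_iff]
  simp only [List.any_eq_true]
  constructor
  · rintro ⟨pat, hmem, hc⟩
    by_cases hw : PySem.Str.endswith pat "/*" = true
    · rw [if_pos hw] at hc
      simp only [pysem, tl2] at hw
      obtain ⟨pre, hpre⟩ := hw
      simp only [pysem, tl1, String.toList_append] at hc
      have hbase : PySem.List.slice pat.toList none (some (-2)) = pre := by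
        rw [PySem.List.slice_to_neg_ofNat _ 2 (by norm_num), ← hpre]
        simp
      rw [hbase] at hc
      obtain ⟨rest, hrest⟩ := hc
      have hpat : PySem.Str.slice m none (some (pre.length : Int)) ++ "/*" = pat := by
        apply String.toList_inj.mp
        simp only [String.toList_append, pysem, tl2,
          PySem.List.slice_to_natCast]
        rw [← hrest, List.append_assoc, List.take_left]
        exact hpre
      refine ⟨(pre.length : Int), ?_, ?_⟩
      · rw [PySem.List.mem_pyRange_one]
        refine ⟨by positivity, ?_⟩
        simp only [pysem]
        rw [← hrest]
        simp
      · simp only [Bool.and_eq_true, beq_iff_eq, hpat]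
        refine ⟨?_, List.contains_iff_mem.mpr hmem⟩
        simp only [pysem]
        rw [← hrest, List.append_assoc, List.singleton_append,
          List.getElem?_append_right (le_refl pre.length)]
        simp
    · rw [if_neg hw] at hc; exact absurd hc (by simp)
  · rintro ⟨i, hi, hp⟩
    rw [PySem.List.mem_pyRange_one] at hi
    obtain ⟨i0, rfl⟩ : ∃ n : Nat, i = (n : Int) := ⟨i.toNat, (Int.toNat_of_nonneg hi.1).symm⟩
    have hlt : i0 < m.toList.length := by
      have h2 := hi.2; simp only [pysem] at h2; omega
    simp only [Bool.and_eq_true, beq_iff_eq] at hp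
    obtain ⟨hget, hcont⟩ := hp
    simp only [pysem] at hget
    have hget' : m.toList[i0]? = some '/' := hget
    have hlen : (m.toList.take i0).length = i0 := by rw [List.length_take]; omega
    have hbase : PySem.List.slice (m.toList.take i0 ++ ['/', '*']) none (some (-2))
        = m.toList.take i0 := by
      rw [PySem.List.slice_to_neg_ofNat _ 2 (by norm_num)]
      rw [show (m.toList.take i0 ++ ['/', '*']).length - 2 = i0 by simp [hlen]]
      exact List.take_left' hlen
    refine ⟨PySem.Str.slice m none (some (i0 : Int)) ++ "/*", List.contains_iff_mem.mp hcont, ?_⟩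
    have hw : PySem.Str.endswith (PySem.Str.slice m none (some (i0 : Int)) ++ "/*") "/*" = true := by
      simp only [pysem, tl2, String.toList_append, PySem.List.slice_to_natCast]
      exact List.suffix_append _ _
    rw [if_pos hw]
    simp only [pysem, tl1, tl2, String.toList_append, PySem.List.slice_to_natCast, hbase]
    have hs : m.toList.take i0 ++ ['/'] = m.toList.take (i0 + 1) := by
      rw [List.take_add_one, hget']
      rfl
    rw [hs]
    exact List.take_prefix _ _

-- A's single wildcard loop, with the `t`-guarded disjunction inside, splits into one scan per candidate.
theorem any_wild_split (l : List String) (t : Bool) (P Q : String → Bool) :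
    (l.any fun pat => if PySem.Str.endswith pat "/*" then
        P (PySem.Str.slice pat none (some (-2))) || (t && Q (PySem.Str.slice pat none (some (-2))))
      else false)
    = ((l.any fun pat => if PySem.Str.endswith pat "/*" then P (PySem.Str.slice pat none (some (-2))) else false)
       || (t && (l.any fun pat => if PySem.Str.endswith pat "/*" then Q (PySem.Str.slice pat none (some (-2))) else false))) := by
  induction l with
  | nil => simp
  | cons x xs ih =>
    by_cases hw : PySem.Str.endswith x "/*" = true
    · simp only [List.any_cons, hw, if_pos, ih]
      cases P (PySem.Str.slice x none (some (-2))) <;>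
        cases Q (PySem.Str.slice x none (some (-2))) <;> cases t <;> simp
    · simp only [List.any_cons, hw, ih]; simp

-- ===== VERDICT (by name: the statement is the Claim_ definition above) =====
theorem mime_allowed_spec : Claim_equal_mime_allowed := by
  intro declared sniffed allowed _
  unfold Spec_mime_allowed mime_allowed mime_allowed_alt altOk
  generalize normMime declared = d
  cases sniffed with
  | none =>
    simp only [Option.getD_none]
    rw [any_wild_split allowed false
      (fun b => PySem.Str.startswith d (b ++ "/"))
      (fun b => PySem.Str.startswith "" (b ++ "/")),
      wild_eq_slash allowed d]
    cases allowed.contains d <;> simp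
  | some s =>
    simp only [Option.getD_some]
    rw [any_wild_split allowed (decide (s ≠ ""))
      (fun b => PySem.Str.startswith d (b ++ "/"))
      (fun b => PySem.Str.startswith s (b ++ "/")),
      wild_eq_slash allowed d, wild_eq_slash allowed s]
    by_cases hs : s = "" <;>
      cases allowed.contains d <;>
      cases allowed.contains s <;> simp [hs]
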